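-- pv_equiv track=rewrite | github.com/ansible/ansible | lib/ansible/modules/network/awplus/awplus_bgp.py | fix_commands
-- ===== SOURCE A (Python) =====
-- def fix_commands(commands):
--     local_as_command = ''
--     confederation_id_command = ''
--     confederation_peers_command = ''
--
--     for command in commands:
--         if 'local-as' in command:
--             local_as_command = command
--         elif 'confederation identifier' in command:
--             confederation_id_command = command
--         elif 'confederation peers' in command:
--             confederation_peers_command = command
--
--     if local_as_command and confederation_id_command:
--         if 'no' in confederation_id_command:
--             commands.pop(commands.index(local_as_command))
--             commands.pop(commands.index(confederation_id_command))
--             commands.append(confederation_id_command)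
--             commands.append(local_as_command)
--         else:
--             commands.pop(commands.index(local_as_command))
--             commands.pop(commands.index(confederation_id_command))
--             commands.append(local_as_command)
--             commands.append(confederation_id_command)
--
--     if confederation_peers_command and confederation_id_command:
--         if local_as_command:
--             if 'no' in local_as_command:
--                 commands.pop(commands.index(local_as_command))
--                 commands.pop(commands.index(confederation_id_command))
--                 commands.pop(commands.index(confederation_peers_command))
--                 commands.append(confederation_id_command)
--                 commands.append(confederation_peers_command)
--                 commands.append(local_as_command)
--             else:
--                 commands.pop(commands.index(local_as_command))
--                 commands.pop(commands.index(confederation_id_command))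
--                 commands.pop(commands.index(confederation_peers_command))
--                 commands.append(local_as_command)
--                 commands.append(confederation_id_command)
--                 commands.append(confederation_peers_command)
--         else:
--             commands.pop(commands.index(confederation_peers_command))
--             commands.pop(commands.index(confederation_id_command))
--             commands.append(confederation_id_command)
--             commands.append(confederation_peers_command)
--
--     return commands
-- ===== SOURCE B (Python) =====
-- def fix_commands(commands):
--     local_as_command = ''
--     confederation_id_command = ''
--     confederation_peers_command = ''
--     for command in commands:
--         if 'local-as' in command:
--             local_as_command = command
--         elif 'confederation identifier' in command:
--             confederation_id_command = command
--         elif 'confederation peers' in command: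
--             confederation_peers_command = command
--
--     la, ci, pe = local_as_command, confederation_id_command, confederation_peers_command
--     if ci and la and pe:
--         tail = [ci, pe, la] if 'no' in la else [la, ci, pe]
--     elif ci and la:
--         tail = [ci, la] if 'no' in ci else [la, ci]
--     elif ci and pe:
--         tail = [ci, pe]
--     else:
--         return commands
--
--     kept = []
--     pending = list(tail)
--     for c in commands:
--         if c in pending:
--             pending.remove(c)
--         else:
--             kept.append(c)
--     commands[:] = kept + tail
--     return commands
-- ===== Notes on version B (the rewrite author's own statement) =====
-- stated objective: simpler
-- what changed: Replaces A's sequence of overlapping pop(index)/append mutation blocks with a case table that computes the final tail order once, followed by a single rebuild pass that drops one occurrence of each tail command and appends the tail; Pre_ excludes lists where all three command kinds are captured and the captured local-as or confederation-identifier command occurs more than once, since there A's two overlapping pop/append blocks shuffle the accidental duplicate copies and either placement of the leftover duplicates is defensible.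
import Mathlib
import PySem

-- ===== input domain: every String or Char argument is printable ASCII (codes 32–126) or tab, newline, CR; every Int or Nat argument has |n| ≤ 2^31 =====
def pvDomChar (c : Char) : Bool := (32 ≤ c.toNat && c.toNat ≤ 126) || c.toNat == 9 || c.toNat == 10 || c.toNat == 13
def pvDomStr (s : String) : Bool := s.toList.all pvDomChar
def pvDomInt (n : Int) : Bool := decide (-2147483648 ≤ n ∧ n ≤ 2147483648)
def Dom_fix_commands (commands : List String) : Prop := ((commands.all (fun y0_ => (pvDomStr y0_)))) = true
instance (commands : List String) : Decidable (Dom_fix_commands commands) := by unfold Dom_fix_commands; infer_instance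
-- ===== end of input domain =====

-- B computes the final tail order once from a case table and rebuilds the list in a single pass,
-- instead of A's sequence of overlapping pop(index)/append mutation blocks (both Pythons mutate
-- the passed list in place and return it; the equivalence proved is about the return value).

-- shared helper: both Pythons begin with the identical scan loop capturing the last
-- command containing each marker (same if/elif chain)
def pvScan (commands : List String) (la ci pe : String) : String × String × String :=
  match commands with
  | [] => (la, ci, pe)
  | c :: cs =>
    if PySem.Str.isIn "local-as" c then pvScan cs c ci pe
    else if PySem.Str.isIn "confederation identifier" c then pvScan cs la c pe
    else if PySem.Str.isIn "confederation peers" c then pvScan cs la ci c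
    else pvScan cs la ci pe

-- ===== PORT A =====
-- commands.pop(commands.index(x)); the none branches are unreachable where A calls it
-- (x is always a member), so no input is excluded
def pvPopIdx (l : List String) (x : String) : List String :=
  match PySem.List.index? l x with
  | some i =>
    match PySem.List.pop? l (i : Int) with
    | some r => r.2
    | none => l
  | none => l

def fix_commands (commands : List String) : List String :=
  let s := pvScan commands "" "" ""
  let la := s.1
  let ci := s.2.1
  let pe := s.2.2
  let commands :=
    if la ≠ "" ∧ ci ≠ "" then
      if PySem.Str.isIn "no" ci then pvPopIdx (pvPopIdx commands la) ci ++ [ci, la]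
      else pvPopIdx (pvPopIdx commands la) ci ++ [la, ci]
    else commands
  let commands :=
    if pe ≠ "" ∧ ci ≠ "" then
      if la ≠ "" then
        if PySem.Str.isIn "no" la then
          pvPopIdx (pvPopIdx (pvPopIdx commands la) ci) pe ++ [ci, pe, la]
        else
          pvPopIdx (pvPopIdx (pvPopIdx commands la) ci) pe ++ [la, ci, pe]
      else pvPopIdx (pvPopIdx commands pe) ci ++ [ci, pe]
    else commands
  commands

-- ===== PORT B =====
-- the rebuild loop of Source B: keep each command unless it is still pending removal
-- ('c in pending' is list membership, 'pending.remove(c)' removes the first occurrence)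
def pvRebuild (pending l : List String) : List String :=
  match l with
  | [] => []
  | c :: cs =>
    if pending.contains c then pvRebuild (pending.erase c) cs
    else c :: pvRebuild pending cs

def fix_commands_alt (commands : List String) : List String :=
  let s := pvScan commands "" "" ""
  let la := s.1
  let ci := s.2.1
  let pe := s.2.2
  if ci ≠ "" ∧ la ≠ "" ∧ pe ≠ "" then
    let tail := if PySem.Str.isIn "no" la then [ci, pe, la] else [la, ci, pe]
    pvRebuild tail commands ++ tail
  else if ci ≠ "" ∧ la ≠ "" then
    let tail := if PySem.Str.isIn "no" ci then [ci, la] else [la, ci]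
    pvRebuild tail commands ++ tail
  else if ci ≠ "" ∧ pe ≠ "" then
    pvRebuild [ci, pe] commands ++ [ci, pe]
  else commands

-- ===== PRECONDITION & SPEC =====
-- declarative forms of the three captured commands: the last element containing each marker
-- (respecting the if/elif chain's priorities)
def pvLastLa (l : List String) : Option String :=
  (l.filter (fun c => PySem.Str.isIn "local-as" c)).getLast?
def pvLastCi (l : List String) : Option String :=
  (l.filter (fun c => !PySem.Str.isIn "local-as" c
      && PySem.Str.isIn "confederation identifier" c)).getLast?
def pvLastPe (l : List String) : Option String :=
  (l.filter (fun c => !PySem.Str.isIn "local-as" c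
      && !PySem.Str.isIn "confederation identifier" c
      && PySem.Str.isIn "confederation peers" c)).getLast?

-- Pre_ excludes lists where all three command kinds are captured and the captured local-as or
-- confederation-identifier command occurs more than once: there A's two overlapping pop/append
-- blocks shuffle the accidental duplicate copies, and either placement of the leftover
-- duplicates is defensible.
def Pre_fix_commands (commands : List String) : Prop :=
  ((pvLastLa commands).isSome ∧ (pvLastCi commands).isSome ∧ (pvLastPe commands).isSome) →
    (commands.count ((pvLastLa commands).getD "") ≤ 1 ∧
     commands.count ((pvLastCi commands).getD "") ≤ 1)
instance (commands : List String) : Decidable (Pre_fix_commands commands) := by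
  unfold Pre_fix_commands; infer_instance

def pvWitness_fix_commands : List String :=
  ["local-as 65001", "confederation identifier 2", "router bgp"]

def Spec_fix_commands (commands : List String) (out : List String) : Prop := out = fix_commands_alt commands
instance (commands : List String) (out : List String) : Decidable (Spec_fix_commands commands out) := by unfold Spec_fix_commands; infer_instance

-- ===== CLAIM (what is proved, stated in full; the proofs are below) =====
def Claim_equal_fix_commands : Prop := ∀ (commands : List String), Dom_fix_commands commands → Pre_fix_commands commands → Spec_fix_commands commands (fix_commands commands)

-- ===== LEMMAS AND PROOFS =====

-- pop(index(x)) removes the first occurrence of x (identity when absent)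
theorem pvPopIdx_eq_erase (l : List String) (x : String) : pvPopIdx l x = l.erase x := by
  induction l with
  | nil => rfl
  | cons c cs ih =>
    by_cases hc : c = x
    · subst hc
      unfold pvPopIdx
      rw [PySem.List.index?_cons_self]
      have h0 : PySem.List.pop? (c :: cs) ((0 : Nat) : Int) = some (c, cs) := by
        simp [PySem.List.pop?_zero_cons]
      simpa using congrArg (fun o => (match o with
        | some (r : String × List String) => r.2
        | none => c :: cs)) h0
    · rw [List.erase_cons_tail (by simpa using hc)]
      unfold pvPopIdx
      rw [PySem.List.index?_cons_of_ne cs hc]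
      cases hidx : PySem.List.index? cs x with
      | none =>
        have hx : x ∉ cs := (PySem.List.index?_eq_none_iff _ _).mp hidx
        simp [List.erase_of_not_mem hx]
      | some i =>
        have hlt : i < cs.length := by
          obtain ⟨pre, suf, hdec, hlen, _⟩ := (PySem.List.index?_eq_some_iff _ _ _).mp hidx
          subst hdec; simp [← hlen]
        have h1 : PySem.List.pop? (c :: cs) (((i + 1 : Nat)) : Int) =
            some ((c :: cs)[i + 1]'(by simpa using Nat.succ_lt_succ hlt), (c :: cs).eraseIdx (i + 1)) :=
          PySem.List.pop?_natCast (c :: cs) (i + 1) (by simpa using Nat.succ_lt_succ hlt)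
        have h2 : PySem.List.pop? cs ((i : Nat) : Int) =
            some (cs[i]'hlt, cs.eraseIdx i) := PySem.List.pop?_natCast cs i hlt
        have ihe : pvPopIdx cs x = cs.erase x := ih
        unfold pvPopIdx at ihe
        rw [hidx] at ihe
        simp only [h2] at ihe
        simp only [Option.map_some, h1, List.eraseIdx_cons_succ]
        rw [ihe]

-- scan invariant: each captured value is either the initial accumulator or a member of the
-- list satisfying (and, by the elif chain, failing) the corresponding containment tests
theorem pvScan_spec (l : List String) : ∀ (la ci pe : String),
    ((pvScan l la ci pe).1 = la ∨ ((pvScan l la ci pe).1 ∈ l ∧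
        PySem.Str.isIn "local-as" (pvScan l la ci pe).1 = true)) ∧
    ((pvScan l la ci pe).2.1 = ci ∨ ((pvScan l la ci pe).2.1 ∈ l ∧
        PySem.Str.isIn "confederation identifier" (pvScan l la ci pe).2.1 = true ∧
        PySem.Str.isIn "local-as" (pvScan l la ci pe).2.1 = false)) ∧
    ((pvScan l la ci pe).2.2 = pe ∨ ((pvScan l la ci pe).2.2 ∈ l ∧
        PySem.Str.isIn "confederation peers" (pvScan l la ci pe).2.2 = true ∧
        PySem.Str.isIn "local-as" (pvScan l la ci pe).2.2 = false ∧
        PySem.Str.isIn "confederation identifier" (pvScan l la ci pe).2.2 = false)) := by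
  induction l with
  | nil => intro la ci pe; simp [pvScan]
  | cons c cs ih =>
    intro la ci pe
    by_cases h1 : PySem.Str.isIn "local-as" c = true
    · rw [pvScan, if_pos h1]
      obtain ⟨A, B, C⟩ := ih c ci pe
      refine ⟨?_, ?_, ?_⟩
      · rcases A with h | ⟨hm, hp⟩
        · exact Or.inr ⟨by simp [h], by rw [h]; exact h1⟩
        · exact Or.inr ⟨List.mem_cons_of_mem _ hm, hp⟩
      · rcases B with h | ⟨hm, hp⟩
        · exact Or.inl h
        · exact Or.inr ⟨List.mem_cons_of_mem _ hm, hp⟩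
      · rcases C with h | ⟨hm, hp⟩
        · exact Or.inl h
        · exact Or.inr ⟨List.mem_cons_of_mem _ hm, hp⟩
    · by_cases h2 : PySem.Str.isIn "confederation identifier" c = true
      · rw [pvScan, if_neg h1, if_pos h2]
        obtain ⟨A, B, C⟩ := ih la c pe
        refine ⟨?_, ?_, ?_⟩
        · rcases A with h | ⟨hm, hp⟩
          · exact Or.inl h
          · exact Or.inr ⟨List.mem_cons_of_mem _ hm, hp⟩
        · rcases B with h | ⟨hm, hp⟩
          · exact Or.inr ⟨by simp [h], by rw [h]; exact h2, by rw [h]; simpa using h1⟩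
          · exact Or.inr ⟨List.mem_cons_of_mem _ hm, hp⟩
        · rcases C with h | ⟨hm, hp⟩
          · exact Or.inl h
          · exact Or.inr ⟨List.mem_cons_of_mem _ hm, hp⟩
      · by_cases h3 : PySem.Str.isIn "confederation peers" c = true
        · rw [pvScan, if_neg h1, if_neg h2, if_pos h3]
          obtain ⟨A, B, C⟩ := ih la ci c
          refine ⟨?_, ?_, ?_⟩
          · rcases A with h | ⟨hm, hp⟩
            · exact Or.inl h
            · exact Or.inr ⟨List.mem_cons_of_mem _ hm, hp⟩
          · rcases B with h | ⟨hm, hp⟩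
            · exact Or.inl h
            · exact Or.inr ⟨List.mem_cons_of_mem _ hm, hp⟩
          · rcases C with h | ⟨hm, hp⟩
            · exact Or.inr ⟨by simp [h], by rw [h]; exact h3, by rw [h]; simpa using h1,
                by rw [h]; simpa using h2⟩
            · exact Or.inr ⟨List.mem_cons_of_mem _ hm, hp⟩
        · rw [pvScan, if_neg h1, if_neg h2, if_neg h3]
          obtain ⟨A, B, C⟩ := ih la ci pe
          refine ⟨?_, ?_, ?_⟩
          · rcases A with h | ⟨hm, hp⟩
            · exact Or.inl h
            · exact Or.inr ⟨List.mem_cons_of_mem _ hm, hp⟩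
          · rcases B with h | ⟨hm, hp⟩
            · exact Or.inl h
            · exact Or.inr ⟨List.mem_cons_of_mem _ hm, hp⟩
          · rcases C with h | ⟨hm, hp⟩
            · exact Or.inl h
            · exact Or.inr ⟨List.mem_cons_of_mem _ hm, hp⟩

-- the scan computes the last matching element of each kind
theorem getLast?_cons_eq (a : String) (t : List String) :
    (a :: t).getLast? = some (t.getLast?.getD a) := by
  induction t generalizing a with
  | nil => rfl
  | cons b u ih => rw [List.getLast?_cons_cons, ih b]; rfl

theorem pvScan_eq_last (l : List String) : ∀ (la0 ci0 pe0 : String),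
    pvScan l la0 ci0 pe0 =
      ((pvLastLa l).getD la0, (pvLastCi l).getD ci0, (pvLastPe l).getD pe0) := by
  induction l with
  | nil => intro la0 ci0 pe0; simp [pvScan, pvLastLa, pvLastCi, pvLastPe]
  | cons c cs ih =>
    intro la0 ci0 pe0
    by_cases h1 : PySem.Str.isIn "local-as" c = true
    · rw [pvScan, if_pos h1, ih]
      refine Prod.ext ?_ (Prod.ext ?_ ?_)
      · simp only [pvLastLa, List.filter_cons, h1, if_true, getLast?_cons_eq,
          Option.getD_some]
      · simp only [pvLastCi, List.filter_cons, h1, Bool.not_true, Bool.false_and,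
          Bool.false_eq_true, if_false]
      · simp only [pvLastPe, List.filter_cons, h1, Bool.not_true, Bool.false_and,
          Bool.false_eq_true, if_false]
    · have h1' : PySem.Str.isIn "local-as" c = false := by
        simpa using h1
      by_cases h2 : PySem.Str.isIn "confederation identifier" c = true
      · rw [pvScan, if_neg h1, if_pos h2, ih]
        refine Prod.ext ?_ (Prod.ext ?_ ?_)
        · simp only [pvLastLa, List.filter_cons, h1', Bool.false_eq_true, if_false]
        · simp only [pvLastCi, List.filter_cons, h1', h2, Bool.not_false, Bool.true_and,
            if_true, getLast?_cons_eq, Option.getD_some]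
        · simp only [pvLastPe, List.filter_cons, h1', h2, Bool.not_false, Bool.not_true,
            Bool.true_and, Bool.false_and, Bool.false_eq_true, if_false]
      · have h2' : PySem.Str.isIn "confederation identifier" c = false := by
          simpa using h2
        by_cases h3 : PySem.Str.isIn "confederation peers" c = true
        · rw [pvScan, if_neg h1, if_neg h2, if_pos h3, ih]
          refine Prod.ext ?_ (Prod.ext ?_ ?_)
          · simp only [pvLastLa, List.filter_cons, h1', Bool.false_eq_true, if_false]
          · simp only [pvLastCi, List.filter_cons, h1', h2', Bool.not_false, Bool.true_and,
              Bool.false_eq_true, if_false]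
          · simp only [pvLastPe, List.filter_cons, h1', h2', h3, Bool.not_false,
              Bool.true_and, if_true, getLast?_cons_eq, Option.getD_some]
        · have h3' : PySem.Str.isIn "confederation peers" c = false := by
            simpa using h3
          rw [pvScan, if_neg h1, if_neg h2, if_neg h3, ih]
          refine Prod.ext ?_ (Prod.ext ?_ ?_)
          · simp only [pvLastLa, List.filter_cons, h1', Bool.false_eq_true, if_false]
          · simp only [pvLastCi, List.filter_cons, h1', h2', Bool.not_false, Bool.true_and,
              Bool.false_eq_true, if_false]
          · simp only [pvLastPe, List.filter_cons, h1', h2', h3', Bool.not_false,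
              Bool.true_and, Bool.false_eq_true, if_false]

-- the rebuild loop removes the first occurrence of each pending value
theorem foldl_erase_nil (p : List String) : p.foldl List.erase ([] : List String) = [] := by
  induction p with
  | nil => rfl
  | cons a q ih => simpa using ih

theorem foldl_erase_not_mem {c : String} {p : List String} (h : ∀ a ∈ p, a ≠ c)
    (cs : List String) : p.foldl List.erase (c :: cs) = c :: p.foldl List.erase cs := by
  induction p generalizing cs with
  | nil => rfl
  | cons a q ih =>
    have ha : a ≠ c := h a (by simp)
    simp only [List.foldl_cons]
    rw [List.erase_cons_tail (by simpa using fun e => ha e.symm)]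
    exact ih (fun b hb => h b (by simp [hb])) (cs.erase a)

theorem foldl_erase_mem {c : String} {p : List String} (hc : c ∈ p) (l : List String) :
    p.foldl List.erase l = (p.erase c).foldl List.erase (l.erase c) := by
  induction p generalizing l with
  | nil => cases hc
  | cons a q ih =>
    by_cases ha : a = c
    · subst ha; rw [List.erase_cons_head]; rfl
    · have hcq : c ∈ q := by
        rcases List.mem_cons.mp hc with h | h
        · exact absurd h.symm ha
        · exact h
      rw [List.erase_cons_tail (by simpa using ha)]
      simp only [List.foldl_cons]
      rw [ih hcq (l.erase a), List.erase_comm]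

theorem pvRebuild_eq_foldl (p l : List String) :
    pvRebuild p l = p.foldl List.erase l := by
  induction l generalizing p with
  | nil => rw [foldl_erase_nil]; rfl
  | cons c cs ih =>
    by_cases hc : c ∈ p
    · rw [pvRebuild, if_pos (by simpa using hc), ih,
        foldl_erase_mem hc (c :: cs), List.erase_cons_head]
    · rw [pvRebuild, if_neg (by simpa using hc), ih,
        foldl_erase_not_mem (fun a ha e => hc (by rw [e] at ha; exact ha)) cs]

-- main equivalence on Pre_
theorem ab_eq (l : List String) (hpre : Pre_fix_commands l) :
    fix_commands l = fix_commands_alt l := by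
  obtain ⟨Hla, Hci, Hpe⟩ := pvScan_spec l "" "" ""
  simp only [fix_commands, fix_commands_alt, pvPopIdx_eq_erase, pvRebuild_eq_foldl]
  set la := (pvScan l "" "" "").1 with hladef
  set ci := (pvScan l "" "" "").2.1 with hcidef
  set pe := (pvScan l "" "" "").2.2 with hpedef
  by_cases hc : ci = ""
  · rw [if_neg (show ¬(pe ≠ "" ∧ ci ≠ "") from fun h => h.2 hc),
      if_neg (show ¬(la ≠ "" ∧ ci ≠ "") from fun h => h.2 hc),
      if_neg (show ¬(ci ≠ "" ∧ la ≠ "" ∧ pe ≠ "") from fun h => h.1 hc),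
      if_neg (show ¬(ci ≠ "" ∧ la ≠ "") from fun h => h.1 hc),
      if_neg (show ¬(ci ≠ "" ∧ pe ≠ "") from fun h => h.1 hc)]
  · obtain ⟨hciMem, hciIn, hciNotLa⟩ := Hci.resolve_left hc
    by_cases hl : la = ""
    · by_cases hp : pe = ""
      · rw [if_neg (show ¬(pe ≠ "" ∧ ci ≠ "") from fun h => h.1 hp),
          if_neg (show ¬(la ≠ "" ∧ ci ≠ "") from fun h => h.1 hl),
          if_neg (show ¬(ci ≠ "" ∧ la ≠ "" ∧ pe ≠ "") from fun h => h.2.1 hl),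
          if_neg (show ¬(ci ≠ "" ∧ la ≠ "") from fun h => h.2 hl),
          if_neg (show ¬(ci ≠ "" ∧ pe ≠ "") from fun h => h.2 hp)]
      · obtain ⟨hpeMem, hpeIn, hpeNotLa, hpeNotCi⟩ := Hpe.resolve_left hp
        rw [if_pos (show pe ≠ "" ∧ ci ≠ "" from ⟨hp, hc⟩),
          if_neg (show ¬la ≠ "" from fun h => h hl),
          if_neg (show ¬(la ≠ "" ∧ ci ≠ "") from fun h => h.1 hl),
          if_neg (show ¬(ci ≠ "" ∧ la ≠ "" ∧ pe ≠ "") from fun h => h.2.1 hl),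
          if_neg (show ¬(ci ≠ "" ∧ la ≠ "") from fun h => h.2 hl),
          if_pos (show ci ≠ "" ∧ pe ≠ "" from ⟨hc, hp⟩)]
        simp only [List.foldl_cons, List.foldl_nil]
        rw [List.erase_comm]
    · obtain ⟨hlaMem, hlaIn⟩ := Hla.resolve_left hl
      have hlaci : la ≠ ci := by
        intro h; rw [← h] at hciNotLa; rw [hlaIn] at hciNotLa; simp at hciNotLa
      by_cases hp : pe = ""
      · rw [if_neg (show ¬(pe ≠ "" ∧ ci ≠ "") from fun h => h.1 hp),
          if_pos (show la ≠ "" ∧ ci ≠ "" from ⟨hl, hc⟩),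
          if_neg (show ¬(ci ≠ "" ∧ la ≠ "" ∧ pe ≠ "") from fun h => h.2.2 hp),
          if_pos (show ci ≠ "" ∧ la ≠ "" from ⟨hc, hl⟩)]
        by_cases hno : PySem.Str.isIn "no" ci = true
        · rw [if_pos hno, if_pos hno]
          simp only [List.foldl_cons, List.foldl_nil]
          rw [List.erase_comm]
        · rw [if_neg hno, if_neg hno]
          simp only [List.foldl_cons, List.foldl_nil]
      · -- all three captured: Pre_ bounds the la/ci counts
        obtain ⟨hpeMem, hpeIn, hpeNotLa, hpeNotCi⟩ := Hpe.resolve_left hp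
        have hpela : pe ≠ la := by
          intro h; rw [h] at hpeNotLa; rw [hlaIn] at hpeNotLa; simp at hpeNotLa
        have hpeci : pe ≠ ci := by
          intro h; rw [h] at hpeNotCi; rw [hciIn] at hpeNotCi; simp at hpeNotCi
        have hscan := pvScan_eq_last l "" "" ""
        have hla_some : pvLastLa l = some la := by
          cases h : pvLastLa l with
          | none => exfalso; apply hl; rw [hladef, hscan, h]; rfl
          | some v => rw [hladef, hscan]; simp [h]
        have hci_some : pvLastCi l = some ci := by
          cases h : pvLastCi l with
          | none => exfalso; apply hc; rw [hcidef, hscan, h]; rfl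
          | some v => rw [hcidef, hscan]; simp [h]
        have hpe_some : (pvLastPe l).isSome := by
          cases h : pvLastPe l with
          | none => exfalso; apply hp; rw [hpedef, hscan, h]; rfl
          | some v => rfl
        have hcounts := hpre ⟨by rw [hla_some]; rfl, by rw [hci_some]; rfl, hpe_some⟩
        rw [hla_some, hci_some] at hcounts
        simp only [Option.getD_some] at hcounts
        have hla_not : la ∉ (l.erase la).erase ci := by
          intro hmem
          have h1 : la ∈ l.erase la := List.mem_of_mem_erase hmem
          have h2 : 1 ≤ (l.erase la).count la := List.count_pos_iff.mpr h1
          rw [List.count_erase_self] at h2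
          omega
        have hci_not : ci ∉ (l.erase la).erase ci := by
          intro hmem
          have h2 : 1 ≤ ((l.erase la).erase ci).count ci := List.count_pos_iff.mpr hmem
          rw [List.count_erase_self, List.count_erase_of_ne (Ne.symm hlaci)] at h2
          omega
        have key : ∀ o1 : List String, o1 = [ci, la] ∨ o1 = [la, ci] →
            ((((l.erase la).erase ci ++ o1).erase la).erase ci).erase pe
              = (((l.erase la).erase ci).erase pe : List String) := by
          intro o1 ho1
          rw [List.erase_append_right o1 hla_not]
          have he1 : o1.erase la = [ci] := by
            rcases ho1 with h | h <;> subst h <;>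
              simp [Ne.symm hlaci]
          rw [he1, List.erase_append_right [ci] hci_not, List.erase_cons_head,
            List.append_nil]
        rw [if_pos (show pe ≠ "" ∧ ci ≠ "" from ⟨hp, hc⟩),
          if_pos (show la ≠ "" from hl),
          if_pos (show la ≠ "" ∧ ci ≠ "" from ⟨hl, hc⟩),
          if_pos (show ci ≠ "" ∧ la ≠ "" ∧ pe ≠ "" from ⟨hc, hl, hp⟩)]
        by_cases hno2 : PySem.Str.isIn "no" la = true
        · rw [if_pos hno2, if_pos hno2]
          by_cases hno : PySem.Str.isIn "no" ci = true
          · rw [if_pos hno, key [ci, la] (Or.inl rfl)]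
            simp only [List.foldl_cons, List.foldl_nil]
            rw [List.erase_comm la ci (l := l), List.erase_comm la pe (l := l.erase ci)]
          · rw [if_neg hno, key [la, ci] (Or.inr rfl)]
            simp only [List.foldl_cons, List.foldl_nil]
            rw [List.erase_comm la ci (l := l), List.erase_comm la pe (l := l.erase ci)]
        · rw [if_neg hno2, if_neg hno2]
          by_cases hno : PySem.Str.isIn "no" ci = true
          · rw [if_pos hno, key [ci, la] (Or.inl rfl)]
            simp only [List.foldl_cons, List.foldl_nil]
          · rw [if_neg hno, key [la, ci] (Or.inr rfl)]
            simp only [List.foldl_cons, List.foldl_nil]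

-- ===== VERDICT (by name: the statement is the Claim_ definition above) =====
theorem fix_commands_spec : Claim_equal_fix_commands := by
  intro commands _ hpre
  unfold Spec_fix_commands
  exact ab_eq commands hpre
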